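-- pv_equiv track=rewrite | github.com/kmanu225/cryptoword | maths/useful.py | find_ngram
-- ===== SOURCE A (Python) =====
-- def find_ngram(text, n):
--     ngrams = {}
--     for i in range(len(text) - n + 1):
--         ngram = text[i : i + n]
--         if ngram in ngrams:
--             ngrams[ngram].append(i)
--         else:
--             ngrams[ngram] = [i]
--
--     multiple_ngrams = {
--         key: [
--             ngrams[key][i + 1] - ngrams[key][i]
--             for i in range(len(ngrams[key]) - 1)
--         ] for key, value in ngrams.items() if len(value) > 1
--     }
--     return multiple_ngrams
-- ===== SOURCE B (Python) =====
-- def find_ngram(text, n):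
--     last = {}
--     gaps = {}
--     for i in range(len(text) - n + 1):
--         g = text[i : i + n]
--         if g in last:
--             gaps[g].append(i - last[g])
--         else:
--             gaps[g] = []
--         last[g] = i
--     return {k: v for k, v in gaps.items() if v}
-- ===== Notes on version B (the rewrite author's own statement) =====
-- stated objective: alternative
-- what changed: Replaced A's two phases (collect all positions per ngram, then a comprehension of consecutive differences over each position list) with a single online pass that keeps only the last position per ngram and appends each gap as it appears, filtering empty gap lists at the end.
import Mathlib
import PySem

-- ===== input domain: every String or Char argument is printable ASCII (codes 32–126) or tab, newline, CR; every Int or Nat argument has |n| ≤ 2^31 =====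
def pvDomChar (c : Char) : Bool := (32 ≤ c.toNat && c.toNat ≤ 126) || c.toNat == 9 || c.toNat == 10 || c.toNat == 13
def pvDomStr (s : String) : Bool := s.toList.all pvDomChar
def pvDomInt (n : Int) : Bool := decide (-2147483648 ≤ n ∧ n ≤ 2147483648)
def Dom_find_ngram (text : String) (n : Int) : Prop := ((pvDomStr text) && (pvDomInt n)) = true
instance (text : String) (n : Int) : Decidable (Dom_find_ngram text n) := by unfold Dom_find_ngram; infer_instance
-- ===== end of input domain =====

-- B replaces A's collect-all-positions-then-difference phases by one online pass keeping only the
-- last position per ngram (alternative decomposition; same asymptotic cost, less retained state).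

-- ===== PORT A =====
def find_ngram (text : String) (n : Int) : List (String × List Int) :=
  let ngrams : PySem.Dict String (List Int) :=
    (PySem.List.pyRange 0 (PySem.Str.len text - n + 1) 1).foldl
      (fun d i =>
        let ngram := PySem.Str.slice text (some i) (some (i + n))
        if d.contains ngram then d.insert ngram (d.getD ngram [] ++ [i])
        else d.insert ngram [i])
      PySem.Dict.empty
  (ngrams.items.filter (fun kv => decide (1 < kv.2.length))).map
    (fun kv => (kv.1,
      (PySem.List.pyRange 0 ((kv.2.length : Int) - 1) 1).map
        (fun i => PySem.List.pyGetD kv.2 (i + 1) 0 - PySem.List.pyGetD kv.2 i 0)))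

-- ===== PORT B =====
def find_ngram_alt (text : String) (n : Int) : List (String × List Int) :=
  let st :=
    (PySem.List.pyRange 0 (PySem.Str.len text - n + 1) 1).foldl
      (fun (st : PySem.Dict String Int × PySem.Dict String (List Int)) i =>
        let g := PySem.Str.slice text (some i) (some (i + n))
        let gaps := if st.1.contains g then st.2.insert g (st.2.getD g [] ++ [i - st.1.getD g 0])
                    else st.2.insert g []
        (st.1.insert g i, gaps))
      (PySem.Dict.empty, PySem.Dict.empty)
  st.2.items.filter (fun kv => !kv.2.isEmpty)

-- ===== PRECONDITION & SPEC =====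
def Spec_find_ngram (text : String) (n : Int) (out : List (String × List Int)) : Prop := out = find_ngram_alt text n
instance (text : String) (n : Int) (out : List (String × List Int)) : Decidable (Spec_find_ngram text n out) := by unfold Spec_find_ngram; infer_instance

-- ===== CLAIM (what is proved, stated in full; the proofs are below) =====
def Claim_equal_find_ngram : Prop := ∀ (text : String) (n : Int), Dom_find_ngram text n → Spec_find_ngram text n (find_ngram text n)

-- ===== LEMMAS AND PROOFS =====

-- last element with default 0 (value B's `last` dict holds for a key whose A-side position list is v)
def lastElem (v : List Int) : Int := v.getLast?.getD 0

-- consecutive differences (the value B's `gaps` dict holds for a key whose A-side position list is v)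
def diffs : List Int → List Int
  | a :: b :: t => (b - a) :: diffs (b :: t)
  | _ => []

theorem diffs_singleton (a : Int) : diffs [a] = [] := rfl

theorem length_diffs (v : List Int) : (diffs v).length = v.length - 1 := by
  induction v with
  | nil => rfl
  | cons a t ih =>
    cases t with
    | nil => rfl
    | cons b t' => simp [diffs] at ih ⊢; omega

theorem lastElem_append_singleton (v : List Int) (x : Int) : lastElem (v ++ [x]) = x := by
  simp [lastElem]

theorem diffs_append (v : List Int) (x : Int) (h : v ≠ []) :
    diffs (v ++ [x]) = diffs v ++ [x - lastElem v] := by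
  induction v with
  | nil => exact absurd rfl h
  | cons a t ih =>
    cases t with
    | nil => simp [diffs, lastElem]
    | cons b t' =>
      have := ih (by simp)
      simp only [List.cons_append, diffs] at this ⊢
      rw [this]
      simp [lastElem]

theorem getElem_diffs (v : List Int) (k : Nat) (hk : k < (diffs v).length) :
    (diffs v)[k] = v[k+1]'(by have := length_diffs v; omega) - v[k]'(by have := length_diffs v; omega) := by
  induction v generalizing k with
  | nil => simp [diffs] at hk
  | cons a t ih =>
    cases t with
    | nil => simp [diffs] at hk
    | cons b t' =>
      cases k with
      | zero => simp [diffs]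
      | succ k' =>
        simp only [diffs] at hk ⊢
        simp only [List.getElem_cons_succ]
        exact ih k' (by simpa using hk)

-- A's per-key comprehension equals `diffs`
theorem diffsA_eq_diffs (v : List Int) :
    (PySem.List.pyRange 0 ((v.length : Int) - 1) 1).map
      (fun i => PySem.List.pyGetD v (i + 1) 0 - PySem.List.pyGetD v i 0) = diffs v := by
  apply List.ext_getElem
  · simp [PySem.List.length_pyRange_one, length_diffs]
  · intro k h1 h2
    have hk : k < v.length - 1 := by
      simpa [PySem.List.length_pyRange_one] using h1
    have hr : (PySem.List.pyRange 0 ((v.length : Int) - 1) 1)[k]'(by simpa [PySem.List.length_pyRange_one] using h1) = (k : Int) := by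
      rw [PySem.List.getElem_pyRange_one]; ring
    simp only [List.getElem_map, hr]
    rw [getElem_diffs v k (by rwa [length_diffs])]
    rw [PySem.List.pyGetD_eq_getElem v (i := (k : Int) + 1) 0 (by omega) (by exact_mod_cast (by omega : (k:Int)+1 < (v.length:Int))),
        PySem.List.pyGetD_eq_getElem v (i := (k : Int)) 0 (by omega) (by exact_mod_cast (by omega : (k:Int) < (v.length:Int)))]
    congr 2

-- the loop invariant relating A's position dict to B's (last, gaps) state
def DInv (d : PySem.Dict String (List Int)) (last : PySem.Dict String Int)
    (gaps : PySem.Dict String (List Int)) : Prop :=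
  d.keys.Nodup ∧ (∀ kv ∈ d.items, kv.2 ≠ ([] : List Int)) ∧
  last.items = d.items.map (fun kv => (kv.1, lastElem kv.2)) ∧
  gaps.items = d.items.map (fun kv => (kv.1, diffs kv.2))

def stepA (g : Int → String) (d : PySem.Dict String (List Int)) (i : Int) :
    PySem.Dict String (List Int) :=
  if d.contains (g i) then d.insert (g i) (d.getD (g i) [] ++ [i]) else d.insert (g i) [i]

def stepB (g : Int → String) (st : PySem.Dict String Int × PySem.Dict String (List Int)) (i : Int) :
    PySem.Dict String Int × PySem.Dict String (List Int) :=
  let gaps := if st.1.contains (g i) then st.2.insert (g i) (st.2.getD (g i) [] ++ [i - st.1.getD (g i) 0])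
              else st.2.insert (g i) []
  (st.1.insert (g i) i, gaps)

theorem keys_eq_of_items_map {ν₁ ν₂ : Type} (d₁ : PySem.Dict String ν₁) (d₂ : PySem.Dict String ν₂)
    (f : String × ν₂ → ν₁) (h : d₁.items = d₂.items.map (fun kv => (kv.1, f kv))) :
    d₁.keys = d₂.keys := by
  simp only [PySem.Dict.keys, h, List.map_map]
  rfl

theorem step_inv (g : Int → String) (i : Int) (d : PySem.Dict String (List Int))
    (last : PySem.Dict String Int) (gaps : PySem.Dict String (List Int)) (h : DInv d last gaps) :
    DInv (stepA g d i) (stepB g (last, gaps) i).1 (stepB g (last, gaps) i).2 := by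
  obtain ⟨hnd, hne, hlast, hgaps⟩ := h
  have hkl : last.keys = d.keys := keys_eq_of_items_map _ _ _ hlast
  have hkg : gaps.keys = d.keys := keys_eq_of_items_map _ _ _ hgaps
  have hcl : last.contains (g i) = d.contains (g i) := by
    rw [PySem.Dict.contains_eq_decide_mem_keys, PySem.Dict.contains_eq_decide_mem_keys, hkl]
  have hcg : gaps.contains (g i) = d.contains (g i) := by
    rw [PySem.Dict.contains_eq_decide_mem_keys, PySem.Dict.contains_eq_decide_mem_keys, hkg]
  by_cases hc : d.contains (g i) = true
  · -- key already present: every dict rewrites its entry in place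
    obtain ⟨v, hv⟩ : ∃ v, d.get? (g i) = some v := by
      rw [PySem.Dict.contains_eq_isSome_get?] at hc
      exact Option.isSome_iff_exists.mp hc
    have hmem : (g i, v) ∈ d.items := PySem.Dict.mem_items_of_get?_eq_some _ hv
    have hvne : v ≠ [] := hne _ hmem
    have hdg : d.getD (g i) [] = v := PySem.Dict.getD_of_get?_eq_some _ _ hv
    have hgg : gaps.getD (g i) [] = diffs v := by
      refine PySem.Dict.getD_of_mem_items _ ?_ (by rw [PySem.Dict.keys] at hkg ⊢; rw [hkg]; exact hnd) _
      rw [hgaps]; exact List.mem_map.mpr ⟨(g i, v), hmem, rfl⟩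
    have hlg : last.getD (g i) 0 = lastElem v := by
      refine PySem.Dict.getD_of_mem_items _ ?_ (by rw [PySem.Dict.keys] at hkl ⊢; rw [hkl]; exact hnd) _
      rw [hlast]; exact List.mem_map.mpr ⟨(g i, v), hmem, rfl⟩
    simp only [stepA, stepB, hc, hcl, if_true]
    refine ⟨?_, ?_, ?_, ?_⟩
    · rw [PySem.Dict.keys_insert_of_contains _ _ hc]; exact hnd
    · intro kv hkv
      rw [PySem.Dict.items_insert_of_contains _ _ hc] at hkv
      obtain ⟨p, hp, hpe⟩ := List.mem_map.mp hkv
      by_cases hpk : (p.1 == g i) = true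
      · simp only [hpk, if_true] at hpe; rw [← hpe]; simp
      · rw [if_neg hpk] at hpe
        rw [← hpe]; exact hne p hp
    · rw [PySem.Dict.items_insert_of_contains _ _ (by rw [hcl]; exact hc),
          PySem.Dict.items_insert_of_contains _ _ hc, hlast, List.map_map, List.map_map]
      apply List.map_congr_left
      intro p hp
      by_cases hpk : (p.1 == g i) = true
      · have hp1 : p.1 = g i := by simpa using hpk
        have hpv : p.2 = v := by
          have h2 := PySem.Dict.get?_of_mem_items d (k := p.1) (v := p.2) (by exact hp) hnd
          rw [hp1, hv] at h2; injection h2 with h3; exact h3.symm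
        simp only [Function.comp_apply, hpk, if_true, hdg]
        simp [lastElem_append_singleton]
      · have hpk' : p.1 ≠ g i := by simpa using hpk
        simp [hpk']
    · rw [PySem.Dict.items_insert_of_contains _ _ (by rwa [hcg]),
          PySem.Dict.items_insert_of_contains _ _ hc, hgaps, List.map_map, List.map_map]
      apply List.map_congr_left
      intro p hp
      by_cases hpk : (p.1 == g i) = true
      · simp only [Function.comp_apply, hpk, if_true, hdg, hgg, hlg]
        rw [diffs_append v i hvne]
      · have hpk' : p.1 ≠ g i := by simpa using hpk
        simp [hpk']
  · -- fresh key: every dict appends its entry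
    have hc' : d.contains (g i) = false := by simpa using hc
    simp only [stepA, stepB, hc', hcl, if_false, Bool.false_eq_true]
    refine ⟨?_, ?_, ?_, ?_⟩
    · rw [PySem.Dict.keys_insert_of_not_contains _ _ hc']
      refine List.Nodup.append hnd (List.nodup_singleton _) ?_
      intro a ha hb
      simp only [List.mem_singleton] at hb
      subst hb
      exact absurd ((PySem.Dict.contains_iff_mem_keys d (g i)).mpr ha) (by simp [hc'])
    · intro kv hkv
      rw [PySem.Dict.items_insert_of_not_contains _ _ hc'] at hkv
      rcases List.mem_append.mp hkv with h1 | h1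
      · exact hne kv h1
      · simp only [List.mem_singleton] at h1; rw [h1]; simp
    · rw [PySem.Dict.items_insert_of_not_contains _ _ (by rwa [hcl]),
          PySem.Dict.items_insert_of_not_contains _ _ hc', hlast, List.map_append]
      simp [lastElem]
    · rw [PySem.Dict.items_insert_of_not_contains _ _ (by rwa [hcg]),
          PySem.Dict.items_insert_of_not_contains _ _ hc', hgaps, List.map_append]
      simp [diffs_singleton]

theorem loop_inv (g : Int → String) (l : List Int) (d : PySem.Dict String (List Int))
    (last : PySem.Dict String Int) (gaps : PySem.Dict String (List Int)) (h : DInv d last gaps) :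
    DInv (l.foldl (stepA g) d) (l.foldl (stepB g) (last, gaps)).1 (l.foldl (stepB g) (last, gaps)).2 := by
  induction l generalizing d last gaps with
  | nil => exact h
  | cons i t ih =>
    simp only [List.foldl_cons]
    have := step_inv g i d last gaps h
    exact ih _ _ _ this

theorem DInv_empty : DInv PySem.Dict.empty PySem.Dict.empty PySem.Dict.empty :=
  ⟨by simp [PySem.Dict.keys, PySem.Dict.empty], by simp [PySem.Dict.empty],
   by simp [PySem.Dict.empty], by simp [PySem.Dict.empty]⟩

theorem result_eq (g : Int → String) (l : List Int) :
    (((l.foldl (stepA g) PySem.Dict.empty).items.filter (fun kv => decide (1 < kv.2.length))).map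
      (fun kv => (kv.1,
        (PySem.List.pyRange 0 ((kv.2.length : Int) - 1) 1).map
          (fun i => PySem.List.pyGetD kv.2 (i + 1) 0 - PySem.List.pyGetD kv.2 i 0)))) =
    (l.foldl (stepB g) (PySem.Dict.empty, PySem.Dict.empty)).2.items.filter (fun kv => !kv.2.isEmpty) := by
  obtain ⟨_, _, _, hgaps⟩ :=
    loop_inv g l PySem.Dict.empty PySem.Dict.empty PySem.Dict.empty DInv_empty
  rw [hgaps, List.filter_map]
  have hp : ((fun kv : String × List Int => !kv.2.isEmpty) ∘
      (fun kv : String × List Int => (kv.1, diffs kv.2))) =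
      fun kv : String × List Int => decide (1 < kv.2.length) := by
    funext p
    have hld := length_diffs p.2
    simp only [Function.comp_apply]
    by_cases h : 1 < p.2.length
    · have h2 : diffs p.2 ≠ [] := by
        intro h0; rw [h0] at hld; simp at hld; omega
      simp [h, h2]
    · have h2 : diffs p.2 = [] := by
        refine List.eq_nil_of_length_eq_zero ?_
        omega
      simp [h, h2]
  rw [hp]
  apply List.map_congr_left
  intro p _
  exact congrArg _ (diffsA_eq_diffs p.2)

-- ===== VERDICT (by name: the statement is the Claim_ definition above) =====
theorem find_ngram_spec : Claim_equal_find_ngram := by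
  intro text n _
  unfold Spec_find_ngram find_ngram find_ngram_alt
  exact result_eq (fun i => PySem.Str.slice text (some i) (some (i + n)))
    (PySem.List.pyRange 0 (PySem.Str.len text - n + 1) 1)
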